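-- pv_equiv track=rewrite | github.com/HarithaGunarathna/Nerospell-Models | eval/nlp.py | align_texts
-- ===== SOURCE A (Python) =====
-- def levenshtein_distance(a, b):
--     """
--     Returns the character-level Levenshtein distance between two strings `a` and `b`.
--     This is the minimal number of single-character edits (insert, delete, substitute)
--     required to transform `a` into `b`.
--     """
--     la, lb = len(a), len(b)
--     dp = [[0]*(lb+1) for _ in range(la+1)]
--
--     for i in range(la+1):
--         dp[i][0] = i
--     for j in range(lb+1):
--         dp[0][j] = j
--
--     for i in range(1, la+1):
--         for j in range(1, lb+1):
--             cost = 0 if a[i-1] == b[j-1] else 1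
--             dp[i][j] = min(
--                 dp[i-1][j] + 1,    # Delete char from a
--                 dp[i][j-1] + 1,    # Insert char into a
--                 dp[i-1][j-1] + cost
--             )
--     return dp[la][lb]
--
-- def align_texts(source, target):
--     """
--     Aligns two sentences at the word level, but uses character-level edit distance
--     to decide the cost of substituting one word with another.
--
--     Returns a dict with:
--       - 'aligned_source': the source words or +/– notations
--       - 'aligned_target': the target words
--     """
--     source_words = source.split()
--     target_words = target.split()
--
--     m, n = len(source_words), len(target_words)
--
--     dp = [[0]*(n+1) for _ in range(m+1)]
--
--     def insertion_cost(word):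
--         return len(word)
--
--     def deletion_cost(word):
--         return len(word)
--
--     def substitution_cost(w1, w2):
--         return levenshtein_distance(w1, w2)
--
--     for i in range(m+1):
--         for j in range(n+1):
--             if i == 0 and j == 0:
--                 dp[i][j] = 0
--             elif i == 0:
--                 dp[i][j] = dp[i][j-1] + insertion_cost(target_words[j-1])
--             elif j == 0:
--                 dp[i][j] = dp[i-1][j] + deletion_cost(source_words[i-1])
--             else:
--                 cost_sub = dp[i-1][j-1] + substitution_cost(source_words[i-1], target_words[j-1])
--                 cost_del = dp[i-1][j] + deletion_cost(source_words[i-1])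
--                 cost_ins = dp[i][j-1] + insertion_cost(target_words[j-1])
--                 dp[i][j] = min(cost_sub, cost_del, cost_ins)
--
--     aligned_source = []
--     i, j = m, n
--     while i > 0 or j > 0:
--         if i > 0 and j > 0:
--             sub_cost = dp[i-1][j-1] + substitution_cost(source_words[i-1], target_words[j-1])
--             if dp[i][j] == sub_cost:
--                 if substitution_cost(source_words[i-1], target_words[j-1]) == 0:
--                     aligned_source.append(source_words[i-1])
--                 else:
--                     aligned_source.append(source_words[i-1])
--                 i -= 1
--                 j -= 1
--                 continue
--
--         if i > 0:
--             del_cost = dp[i-1][j] + deletion_cost(source_words[i-1])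
--             if dp[i][j] == del_cost:
--                 aligned_source.append("".join(f"+{ch}" for ch in source_words[i-1]))
--                 i -= 1
--                 continue
--
--         if j > 0:
--             ins_cost = dp[i][j-1] + insertion_cost(target_words[j-1])
--             if dp[i][j] == ins_cost:
--                 aligned_source.append("".join(f"-{ch}" for ch in target_words[j-1]))
--                 j -= 1
--                 continue
--
--     aligned_source.reverse()
--
--     return {
--         "aligned_source": aligned_source,
--         "aligned_target": target_words
--     }
-- ===== SOURCE B (Python) =====
-- def levenshtein_distance(a, b):
--     """
--     Returns the character-level Levenshtein distance between two strings `a` and `b`.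
--     """
--     la, lb = len(a), len(b)
--     dp = [[0]*(lb+1) for _ in range(la+1)]
--     for i in range(la+1):
--         dp[i][0] = i
--     for j in range(lb+1):
--         dp[0][j] = j
--     for i in range(1, la+1):
--         for j in range(1, lb+1):
--             cost = 0 if a[i-1] == b[j-1] else 1
--             dp[i][j] = min(dp[i-1][j] + 1, dp[i][j-1] + 1, dp[i-1][j-1] + cost)
--     return dp[la][lb]
--
--
-- def align_texts(source, target):
--     """
--     Word-level alignment with char-level substitution cost.
--
--     Forward one-pass dynamic programme: every cell carries (cost, alignment so
--     far), the alignment being extended in place with the same sub > del > ins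
--     priority the minimum induces.  Only two rolling rows are kept; there is no
--     stored table, no backtracking phase and no final reverse.
--     """
--     src = source.split()
--     tgt = target.split()
--
--     # row 0: pure insertions
--     prev = [(0, [])]
--     for w in tgt:
--         c, al = prev[-1]
--         prev.append((c + len(w), al + ["".join("-" + ch for ch in w)]))
--
--     for sw in src:
--         c0, al0 = prev[0]
--         cur = [(c0 + len(sw), al0 + ["".join("+" + ch for ch in sw)])]
--         for j, tw in enumerate(tgt, 1):
--             cs = prev[j - 1][0] + levenshtein_distance(sw, tw)
--             cd = prev[j][0] + len(sw)
--             ci = cur[j - 1][0] + len(tw)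
--             best = min(cs, cd, ci)
--             if best == cs:
--                 cell = (best, prev[j - 1][1] + [sw])
--             elif best == cd:
--                 cell = (best, prev[j][1] + ["".join("+" + ch for ch in sw)])
--             else:
--                 cell = (best, cur[j - 1][1] + ["".join("-" + ch for ch in tw)])
--             cur.append(cell)
--         prev = cur
--
--     return {"aligned_source": prev[-1][1], "aligned_target": tgt}
-- ===== Notes on version B (the rewrite author's own statement) =====
-- stated objective: alternative
-- what changed: B replaces A's two-phase fill-table-then-backtrack with a single forward dynamic programme whose cells carry (cost, alignment-so-far) pairs extended with the sub>del>ins priority the minimum induces, keeping only two rolling rows: no stored table, no backtracking walk, no edit-distance recomputation and no final reverse.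
import Mathlib
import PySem

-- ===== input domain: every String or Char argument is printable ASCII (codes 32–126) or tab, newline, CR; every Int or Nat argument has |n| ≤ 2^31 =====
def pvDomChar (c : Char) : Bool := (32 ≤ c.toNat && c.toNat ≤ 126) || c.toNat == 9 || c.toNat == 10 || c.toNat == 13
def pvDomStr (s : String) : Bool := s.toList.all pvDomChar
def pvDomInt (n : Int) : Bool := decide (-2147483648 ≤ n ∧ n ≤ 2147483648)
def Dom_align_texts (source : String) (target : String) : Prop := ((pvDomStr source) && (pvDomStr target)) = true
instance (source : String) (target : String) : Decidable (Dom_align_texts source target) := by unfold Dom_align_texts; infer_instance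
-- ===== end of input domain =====

-- B replaces A's fill-table-then-backtrack by a single forward DP whose cells carry
-- (cost, alignment-so-far), extended with the sub>del>ins priority the minimum induces;
-- only two rolling rows are kept, with no table, no backtrack and no reverse. Same values.

-- ===== PORT A =====

-- len(word) as a Nat (char count; kernel-friendly via toList)
def strLen (w : String) : Nat := w.toList.length

-- "".join(f"+{ch}" for ch in w): each char prefixed with '+', concatenated (exact on ASCII; pure char-list concat)
def plusNotation (w : String) : String := String.ofList (PySem.Chars.join [] (w.toList.map (fun c => ['+', c])))
-- "".join(f"-{ch}" for ch in w)
def minusNotation (w : String) : String := String.ofList (PySem.Chars.join [] (w.toList.map (fun c => ['-', c])))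

-- inner j-loop of levenshtein_distance: row i from row i-1, dp[i][0] = i; indices always in range (getD default never read)
def levRowA (bl : List Char) (c : Char) (i : Nat) (prev : List Nat) : List Nat :=
  (List.range bl.length).foldl
    (fun cur k =>
      let cost : Nat := if c == bl.getD k ' ' then 0 else 1
      cur ++ [min (min (prev.getD (k+1) 0 + 1) (cur.getD k 0 + 1)) (prev.getD k 0 + cost)])
    [i]

-- shared helper of A and B (B's Python keeps the identical function)
def levenshtein_distance (a b : String) : Nat :=
  let bl := b.toList
  let row0 := List.range (bl.length + 1)          -- dp[0][j] = j
  ((a.toList.foldl (fun (st : List Nat × Nat) c => (levRowA bl c (st.2+1) st.1, st.2+1)) (row0, 0)).1).getD bl.length 0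

-- the body of A's word-level fill loop, all four branches
def atCellA (sws tws : List String) (prev cur : List Nat) (i j : Nat) : Nat :=
  if i = 0 ∧ j = 0 then 0
  else if i = 0 then cur.getD (j-1) 0 + strLen (tws.getD (j-1) "")
  else if j = 0 then prev.getD j 0 + strLen (sws.getD (i-1) "")
  else
    let cost_sub := prev.getD (j-1) 0 + levenshtein_distance (sws.getD (i-1) "") (tws.getD (j-1) "")
    let cost_del := prev.getD j 0 + strLen (sws.getD (i-1) "")
    let cost_ins := cur.getD (j-1) 0 + strLen (tws.getD (j-1) "")
    min (min cost_sub cost_del) cost_ins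

def rowA (sws tws : List String) (prev : List Nat) (i n : Nat) : List Nat :=
  (List.range (n+1)).foldl (fun cur j => cur ++ [atCellA sws tws prev cur i j]) []

def tableA (sws tws : List String) (m n : Nat) : List (List Nat) :=
  (List.range (m+1)).foldl (fun rows i => rows ++ [rowA sws tws (rows.getD (i-1) []) i n]) []

-- A's while-backtrack; fuel = i+j suffices (each pass that fires a branch decreases i+j;
-- if no branch fired Python would loop forever, which never happens for the filled table)
def btA (sws tws : List String) (dp : List (List Nat)) : Nat → Nat → Nat → List String → List String
  | 0, _, _, acc => acc
  | fuel+1, i, j, acc =>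
    if i = 0 ∧ j = 0 then acc
    else
      let dij := (dp.getD i []).getD j 0
      if i ≠ 0 ∧ j ≠ 0 ∧ dij = (dp.getD (i-1) []).getD (j-1) 0 + levenshtein_distance (sws.getD (i-1) "") (tws.getD (j-1) "") then
        btA sws tws dp fuel (i-1) (j-1)
          (acc ++ [if levenshtein_distance (sws.getD (i-1) "") (tws.getD (j-1) "") = 0
                   then sws.getD (i-1) "" else sws.getD (i-1) ""])
      else if i ≠ 0 ∧ dij = (dp.getD (i-1) []).getD j 0 + strLen (sws.getD (i-1) "") then
        btA sws tws dp fuel (i-1) j (acc ++ [plusNotation (sws.getD (i-1) "")])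
      else if j ≠ 0 ∧ dij = (dp.getD i []).getD (j-1) 0 + strLen (tws.getD (j-1) "") then
        btA sws tws dp fuel i (j-1) (acc ++ [minusNotation (tws.getD (j-1) "")])
      else acc

def align_texts (source : String) (target : String) : List (String × List String) :=
  let sws := PySem.Str.split₀ source
  let tws := PySem.Str.split₀ target
  let m := sws.length
  let n := tws.length
  let dp := tableA sws tws m n
  let aligned := (btA sws tws dp (m+n) m n []).reverse
  [("aligned_source", aligned), ("aligned_target", tws)]

-- ===== PORT B =====

-- row 0 of B's forward table past the origin: running insertion cost with its alignment payload
def row0B (tws : List String) (c : Nat) (al : List String) : List (Nat × List String) :=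
  match tws with
  | [] => []
  | w :: rest => (c + strLen w, al ++ [minusNotation w]) :: row0B rest (c + strLen w) (al ++ [minusNotation w])

-- B's inner loop: walks the target words with the matching suffix of the previous row,
-- carrying the diagonal cell and the cell just written; the alignment payload is extended
-- with the sub>del>ins priority the minimum induces
def cellB (sw tw : String) (pdiag pj left : Nat × List String) : Nat × List String :=
  let cs := pdiag.1 + levenshtein_distance sw tw
  let cd := pj.1 + strLen sw
  let ci := left.1 + strLen tw
  let best := min (min cs cd) ci
  if best = cs then (best, pdiag.2 ++ [sw])
  else if best = cd then (best, pj.2 ++ [plusNotation sw])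
  else (best, left.2 ++ [minusNotation tw])

def rowB (sw : String) : List String → List (Nat × List String) → (Nat × List String) → (Nat × List String) → List (Nat × List String)
  | [], _, _, _ => []
  | w :: rest, prev, pdiag, left =>
    let cell := cellB sw w pdiag (prev.headD (0, [])) left
    cell :: rowB sw rest prev.tail (prev.headD (0, [])) cell

-- a full row for source word sw: leading deletion cell, then the loop
def mkRowB (sw : String) (tws : List String) (prev : List (Nat × List String)) : List (Nat × List String) :=
  let h := prev.headD (0, [])
  let c0 := (h.1 + strLen sw, h.2 ++ [plusNotation sw])
  c0 :: rowB sw tws prev.tail h c0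

-- the outer loop keeps only the previous row and returns the last one
def lastRowB (tws : List String) : List String → List (Nat × List String) → List (Nat × List String)
  | [], prev => prev
  | sw :: rest, prev => lastRowB tws rest (mkRowB sw tws prev)

def align_texts_alt (source : String) (target : String) : List (String × List String) :=
  let sws := PySem.Str.split₀ source
  let tws := PySem.Str.split₀ target
  let row0 : List (Nat × List String) := (0, []) :: row0B tws 0 []
  let last := lastRowB tws sws row0
  -- prev[-1]: every row has tws.length+1 cells, so the last one sits at index tws.length
  let fin := last.getD tws.length (0, [])
  [("aligned_source", fin.2), ("aligned_target", tws)]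

-- ===== PRECONDITION & SPEC =====
def Spec_align_texts (source : String) (target : String) (out : List (String × List String)) : Prop := out = align_texts_alt source target
instance (source : String) (target : String) (out : List (String × List String)) : Decidable (Spec_align_texts source target out) := by unfold Spec_align_texts; infer_instance

-- ===== CLAIM (what is proved, stated in full; the proofs are below) =====
def Claim_equal_align_texts : Prop := ∀ (source : String) (target : String), Dom_align_texts source target → Spec_align_texts source target (align_texts source target)

-- ===== LEMMAS AND PROOFS =====

-- the mathematical DP recurrence both programs compute
def dpF (S T : List String) : Nat → Nat → Nat
  | 0, 0 => 0
  | 0, j+1 => dpF S T 0 j + strLen (T.getD j "")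
  | i+1, 0 => dpF S T i 0 + strLen (S.getD i "")
  | i+1, j+1 =>
    min (min (dpF S T i j + levenshtein_distance (S.getD i "") (T.getD j ""))
             (dpF S T i (j+1) + strLen (S.getD i "")))
        (dpF S T (i+1) j + strLen (T.getD j ""))

-- the forward alignment at cell (i, j), chosen with the sub>del>ins priority
def alF (S T : List String) : Nat → Nat → List String
  | 0, 0 => []
  | 0, j+1 => alF S T 0 j ++ [minusNotation (T.getD j "")]
  | i+1, 0 => alF S T i 0 ++ [plusNotation (S.getD i "")]
  | i+1, j+1 =>
    let cs := dpF S T i j + levenshtein_distance (S.getD i "") (T.getD j "")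
    let cd := dpF S T i (j+1) + strLen (S.getD i "")
    let ci := dpF S T (i+1) j + strLen (T.getD j "")
    let best := min (min cs cd) ci
    if best = cs then alF S T i j ++ [S.getD i ""]
    else if best = cd then alF S T i (j+1) ++ [plusNotation (S.getD i "")]
    else alF S T (i+1) j ++ [minusNotation (T.getD j "")]

-- the sequence of emitted strings, last-emitted-first, as A's branch cascade produces it
def traceF (S T : List String) : Nat → Nat → Nat → List String
  | 0, _, _ => []
  | fuel+1, i, j =>
    if i = 0 ∧ j = 0 then []
    else if i ≠ 0 ∧ j ≠ 0 ∧ dpF S T i j = dpF S T (i-1) (j-1) + levenshtein_distance (S.getD (i-1) "") (T.getD (j-1) "") then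
      (if levenshtein_distance (S.getD (i-1) "") (T.getD (j-1) "") = 0
       then S.getD (i-1) "" else S.getD (i-1) "") :: traceF S T fuel (i-1) (j-1)
    else if i ≠ 0 ∧ dpF S T i j = dpF S T (i-1) j + strLen (S.getD (i-1) "") then
      plusNotation (S.getD (i-1) "") :: traceF S T fuel (i-1) j
    else if j ≠ 0 ∧ dpF S T i j = dpF S T i (j-1) + strLen (T.getD (j-1) "") then
      minusNotation (T.getD (j-1) "") :: traceF S T fuel i (j-1)
    else []


-- ---- generic getD helpers ----
lemma pvGetD_concat_of_len {α : Type} (l : List α) (x d : α) (j : Nat) (h : l.length = j) :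
    (l ++ [x]).getD j d = x := by
  subst h; simp [List.getD]

lemma pvGetD_append_left {α : Type} (l l' : List α) (j : Nat) (d : α) (h : j < l.length) :
    (l ++ l').getD j d = l.getD j d := by
  simp [List.getD, List.getElem?_append_left h]

lemma pvHeadD_eq_getD {α : Type} (l : List α) (d : α) : l.headD d = l.getD 0 d := by
  cases l <;> rfl

lemma pvTail_getD {α : Type} (l : List α) (k : Nat) (d : α) : l.tail.getD k d = l.getD (k+1) d := by
  cases l <;> simp [List.getD]

lemma pvDrop_cons (T : List String) (j : Nat) (h : j < T.length) :
    T.drop j = T.getD j "" :: T.drop (j+1) := by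
  rw [List.getD_eq_getElem _ _ h]
  exact List.drop_eq_getElem_cons h

-- ---- A's table computes dpF ----
def rowAP (S T : List String) (prev : List Nat) (i k : Nat) : List Nat :=
  (List.range k).foldl (fun cur j => cur ++ [atCellA S T prev cur i j]) []

lemma rowAP_succ (S T : List String) (prev : List Nat) (i k : Nat) :
    rowAP S T prev i (k+1) = rowAP S T prev i k ++ [atCellA S T prev (rowAP S T prev i k) i k] := by
  simp [rowAP, List.range_succ]

lemma rowAP_length (S T : List String) (prev : List Nat) (i : Nat) :
    ∀ k, (rowAP S T prev i k).length = k := by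
  intro k
  induction k with
  | zero => simp [rowAP]
  | succ k ih => rw [rowAP_succ]; simp [ih]

lemma rowAP_getD (S T : List String) (prev : List Nat) (i : Nat)
    (hprev : i ≠ 0 → ∀ j ≤ T.length, prev.getD j 0 = dpF S T (i-1) j) :
    ∀ k, k ≤ T.length + 1 → ∀ j < k, (rowAP S T prev i k).getD j 0 = dpF S T i j := by
  intro k
  induction k with
  | zero => intro _ j hj; omega
  | succ k ih =>
    intro hk j hj
    rw [rowAP_succ]
    rcases Nat.lt_or_ge j k with h | h
    · rw [pvGetD_append_left _ _ _ _ (by rw [rowAP_length]; exact h)]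
      exact ih (by omega) j h
    · have hjk : j = k := by omega
      subst hjk
      rw [pvGetD_concat_of_len _ _ _ _ (rowAP_length S T prev i j)]
      have hcur : ∀ t, t < j → (rowAP S T prev i j).getD t 0 = dpF S T i t :=
        fun t ht => ih (by omega) t ht
      have hjle : j ≤ T.length := by omega
      unfold atCellA
      rcases i with _ | a <;> rcases j with _ | b
      · simp [dpF]
      · have hc := hcur b (by omega)
        simp only [List.getD] at hc
        simp [hc, dpF]
      · have hp := hprev (by simp)
        have h0 := hp 0 (by omega)
        simp only [List.getD] at h0
        simp [h0, dpF]
      · have hp := hprev (by simp)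
        have ha := hp (b+1) hjle
        have hb := hp b (by omega)
        have hc := hcur b (by omega)
        simp only [List.getD] at ha hb hc
        simp only [Nat.add_sub_cancel] at ha hb hc ⊢
        simp [ha, hb, hc, dpF]

def tableAP (S T : List String) (n k : Nat) : List (List Nat) :=
  (List.range k).foldl (fun rows i => rows ++ [rowA S T (rows.getD (i-1) []) i n]) []

lemma tableAP_succ (S T : List String) (n k : Nat) :
    tableAP S T n (k+1)
      = tableAP S T n k ++ [rowA S T ((tableAP S T n k).getD (k-1) []) k n] := by
  simp [tableAP, List.range_succ]

lemma tableAP_length (S T : List String) (n : Nat) : ∀ k, (tableAP S T n k).length = k := by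
  intro k
  induction k with
  | zero => simp [tableAP]
  | succ k ih => rw [tableAP_succ]; simp [ih]

lemma tableAP_getD (S T : List String) :
    ∀ k, ∀ i < k, ∀ j ≤ T.length,
      ((tableAP S T T.length k).getD i []).getD j 0 = dpF S T i j := by
  intro k
  induction k with
  | zero => intro i hi; omega
  | succ k ih =>
    intro i hi j hj
    rw [tableAP_succ]
    rcases Nat.lt_or_ge i k with h | h
    · rw [pvGetD_append_left _ _ _ _ (by rw [tableAP_length]; exact h)]
      exact ih i h j hj
    · have hik : i = k := by omega
      subst hik
      rw [pvGetD_concat_of_len _ _ _ _ (tableAP_length S T T.length i)]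
      have hprev : i ≠ 0 → ∀ j ≤ T.length,
          ((tableAP S T T.length i).getD (i-1) []).getD j 0 = dpF S T (i-1) j := by
        intro hi0 j hj
        exact ih (i-1) (by omega) j hj
      exact rowAP_getD S T _ i hprev (T.length + 1) (by omega) j (by omega)

lemma tableA_getD (S T : List String) (i j : Nat) (hi : i ≤ S.length) (hj : j ≤ T.length) :
    ((tableA S T S.length T.length).getD i []).getD j 0 = dpF S T i j :=
  tableAP_getD S T (S.length + 1) i (by omega) j hj

-- ---- A's backtrack follows traceF ----
lemma btA_eq (S T : List String) :
    ∀ fuel i j (acc : List String), i ≤ S.length → j ≤ T.length →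
      btA S T (tableA S T S.length T.length) fuel i j acc = acc ++ traceF S T fuel i j := by
  intro fuel
  induction fuel with
  | zero => intro i j acc _ _; simp [btA, traceF]
  | succ fuel ih =>
    intro i j acc hi hj
    have h1 := tableA_getD S T i j hi hj
    have h2 := tableA_getD S T (i-1) (j-1) (by omega) (by omega)
    have h3 := tableA_getD S T (i-1) j (by omega) hj
    have h4 := tableA_getD S T i (j-1) hi (by omega)
    simp only [btA, traceF, h1, h2, h3, h4, ite_self]
    split_ifs with g0 g1 g2 g3
    · simp
    · rw [ih (i-1) (j-1) _ (by omega) (by omega)]; simp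
    · rw [ih (i-1) j _ (by omega) hj]; simp
    · rw [ih i (j-1) _ hi (by omega)]; simp
    · simp

-- ---- the reversed trace is the forward alignment ----
lemma trace_rev (S T : List String) :
    ∀ fuel i j, i + j ≤ fuel → (traceF S T fuel i j).reverse = alF S T i j := by
  intro fuel
  induction fuel with
  | zero =>
    intro i j h
    have hi : i = 0 := by omega
    have hj : j = 0 := by omega
    subst hi; subst hj
    simp [traceF, alF]
  | succ fuel ih =>
    intro i j h
    rcases i with _ | a <;> rcases j with _ | b
    · simp [traceF, alF]
    · -- i = 0: only the insertion branch can fire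
      have hc : dpF S T 0 (b+1) = dpF S T 0 b + strLen (T.getD b "") := by
        simp only [dpF]
      simp only [traceF, hc, Nat.add_sub_cancel]
      norm_num
      rw [ih 0 b (by omega)]
      simp [alF]
    · have hc : dpF S T (a+1) 0 = dpF S T a 0 + strLen (S.getD a "") := by
        simp only [dpF]
      simp only [traceF, hc, Nat.add_sub_cancel]
      norm_num
      rw [ih a 0 (by omega)]
      simp [alF]
    · -- interior cell
      have hd : dpF S T (a+1) (b+1)
          = min (min (dpF S T a b + levenshtein_distance (S.getD a "") (T.getD b ""))
                     (dpF S T a (b+1) + strLen (S.getD a "")))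
                (dpF S T (a+1) b + strLen (T.getD b "")) := by
        simp only [dpF]
      by_cases h1 : dpF S T (a+1) (b+1)
          = dpF S T a b + levenshtein_distance (S.getD a "") (T.getD b "")
      · have e1 : traceF S T (fuel+1) (a+1) (b+1)
            = (S.getD a "") :: traceF S T fuel a b := by
          simp only [traceF, Nat.add_sub_cancel, ite_self]
          rw [if_neg (by omega), if_pos ⟨by omega, by omega, h1⟩]
        rw [e1, List.reverse_cons, ih a b (by omega)]
        simp only [alF]
        rw [if_pos (hd.symm.trans h1)]
      · by_cases h2 : dpF S T (a+1) (b+1) = dpF S T a (b+1) + strLen (S.getD a "")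
        · have e1 : traceF S T (fuel+1) (a+1) (b+1)
              = plusNotation (S.getD a "") :: traceF S T fuel a (b+1) := by
            simp only [traceF, Nat.add_sub_cancel, ite_self]
            rw [if_neg (by omega), if_neg (fun h => h1 h.2.2), if_pos ⟨by omega, h2⟩]
          rw [e1, List.reverse_cons, ih a (b+1) (by omega)]
          simp only [alF]
          rw [if_neg (fun hx => h1 (hd.trans hx)), if_pos (hd.symm.trans h2)]
        · have h3 : dpF S T (a+1) (b+1) = dpF S T (a+1) b + strLen (T.getD b "") := by
            omega
          have e1 : traceF S T (fuel+1) (a+1) (b+1)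
              = minusNotation (T.getD b "") :: traceF S T fuel (a+1) b := by
            simp only [traceF, Nat.add_sub_cancel, ite_self]
            rw [if_neg (by omega), if_neg (fun h => h1 h.2.2), if_neg (fun h => h2 h.2),
              if_pos ⟨by omega, h3⟩]
          rw [e1, List.reverse_cons, ih (a+1) b (by omega)]
          simp only [alF]
          rw [if_neg (fun hx => h1 (hd.trans hx)), if_neg (fun hx => h2 (hd.trans hx))]

-- ---- B's rows compute (dpF, alF) ----
def RowOKB (S T : List String) (i : Nat) (r : List (Nat × List String)) : Prop :=
  ∀ j ≤ T.length, r.getD j (0, []) = (dpF S T i j, alF S T i j)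

lemma row0B_getD (S T : List String) :
    ∀ k j₀ c al, c = dpF S T 0 j₀ → al = alF S T 0 j₀ → j₀ + k < T.length →
      (row0B (T.drop j₀) c al).getD k (0, []) = (dpF S T 0 (j₀+k+1), alF S T 0 (j₀+k+1)) := by
  intro k
  induction k with
  | zero =>
    intro j₀ c al hc hal hlt
    rw [pvDrop_cons T j₀ (by omega)]
    subst hc; subst hal
    simp [row0B, List.getD, dpF, alF]
  | succ k ih =>
    intro j₀ c al hc hal hlt
    rw [pvDrop_cons T j₀ (by omega)]
    subst hc; subst hal
    have := ih (j₀+1) (dpF S T 0 j₀ + strLen (T.getD j₀ ""))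
      (alF S T 0 j₀ ++ [minusNotation (T.getD j₀ "")]) (by simp [dpF]) (by simp [alF]) (by omega)
    simp only [row0B, List.getD_cons_succ]
    rw [this]
    congr 2 <;> omega

lemma pair_if {α : Type} (c : Nat) (p q : Prop) [Decidable p] [Decidable q] (x y z : α) :
    (if p then (c, x) else if q then (c, y) else (c, z))
      = (c, if p then x else if q then y else z) := by
  split_ifs <;> rfl

lemma cellB_correct (S T : List String) (i j : Nat) :
    cellB (S.getD i "") (T.getD j "") (dpF S T i j, alF S T i j)
      (dpF S T i (j+1), alF S T i (j+1)) (dpF S T (i+1) j, alF S T (i+1) j)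
      = (dpF S T (i+1) (j+1), alF S T (i+1) (j+1)) := by
  simp only [cellB]
  rw [pair_if]
  simp only [Prod.mk.injEq]
  exact ⟨by simp [dpF], by simp [alF]⟩

lemma rowB_getD (S T : List String) (i' : Nat) :
    ∀ k j₀ (prev : List (Nat × List String)) (pdiag left : Nat × List String),
      (∀ t, j₀ + 1 + t ≤ T.length → prev.getD t (0, []) = (dpF S T i' (j₀+1+t), alF S T i' (j₀+1+t))) →
      pdiag = (dpF S T i' j₀, alF S T i' j₀) → left = (dpF S T (i'+1) j₀, alF S T (i'+1) j₀) →
      j₀ + k < T.length →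
      (rowB (S.getD i' "") (T.drop j₀) prev pdiag left).getD k (0, [])
        = (dpF S T (i'+1) (j₀+k+1), alF S T (i'+1) (j₀+k+1)) := by
  intro k
  induction k with
  | zero =>
    intro j₀ prev pdiag left hp hd hc hlt
    rw [pvDrop_cons T j₀ (by omega)]
    subst hd; subst hc
    have hpj : prev.headD (0, []) = (dpF S T i' (j₀+1), alF S T i' (j₀+1)) := by
      rw [pvHeadD_eq_getD]
      have := hp 0 (by omega)
      simpa using this
    simp only [rowB, List.getD_cons_zero, hpj]
    simpa using cellB_correct S T i' j₀
  | succ k ih =>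
    intro j₀ prev pdiag left hp hd hc hlt
    rw [pvDrop_cons T j₀ (by omega)]
    subst hd; subst hc
    have hpj : prev.headD (0, []) = (dpF S T i' (j₀+1), alF S T i' (j₀+1)) := by
      rw [pvHeadD_eq_getD]
      have := hp 0 (by omega)
      simpa using this
    simp only [rowB, List.getD_cons_succ, hpj, cellB_correct S T i' j₀]
    have hp' : ∀ t, (j₀+1) + 1 + t ≤ T.length →
        prev.tail.getD t (0, []) = (dpF S T i' ((j₀+1)+1+t), alF S T i' ((j₀+1)+1+t)) := by
      intro t ht
      rw [pvTail_getD]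
      have := hp (t+1) (by omega)
      rw [this]
      congr 2 <;> omega
    have := ih (j₀+1) prev.tail (dpF S T i' (j₀+1), alF S T i' (j₀+1))
      (dpF S T (i'+1) (j₀+1), alF S T (i'+1) (j₀+1)) hp' rfl rfl (by omega)
    rw [this]
    congr 2 <;> omega

lemma mkRowB_ok (S T : List String) (i' : Nat) (prev : List (Nat × List String))
    (hp : RowOKB S T i' prev) : RowOKB S T (i'+1) (mkRowB (S.getD i' "") T prev) := by
  intro j hj
  have hh : prev.headD (0, []) = (dpF S T i' 0, alF S T i' 0) := by
    rw [pvHeadD_eq_getD, hp 0 (by omega)]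
  rcases j with _ | t
  · simp only [mkRowB, List.getD_cons_zero, hh]
    simp [dpF, alF]
  · simp only [mkRowB, List.getD_cons_succ, hh]
    have hp' : ∀ u, 0 + 1 + u ≤ T.length →
        prev.tail.getD u (0, []) = (dpF S T i' (0+1+u), alF S T i' (0+1+u)) := by
      intro u hu
      rw [pvTail_getD, hp (u+1) (by omega)]
      congr 2 <;> omega
    have h0 : ((dpF S T i' 0, alF S T i' 0).1 + strLen (S.getD i' ""),
               (dpF S T i' 0, alF S T i' 0).2 ++ [plusNotation (S.getD i' "")])
        = (dpF S T (i'+1) 0, alF S T (i'+1) 0) := by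
      simp [dpF, alF]
    have := rowB_getD S T i' t 0 prev.tail (dpF S T i' 0, alF S T i' 0)
      (dpF S T (i'+1) 0, alF S T (i'+1) 0) hp' rfl rfl (by omega)
    rw [show T.drop 0 = T from rfl] at this
    rw [show (0:Nat) + t + 1 = t + 1 by omega] at this
    rw [h0, this]

lemma lastRowB_ok (S T : List String) :
    ∀ (rest : List String) (i₀ : Nat) (prev : List (Nat × List String)),
      rest = S.drop i₀ → i₀ ≤ S.length → RowOKB S T i₀ prev →
      RowOKB S T S.length (lastRowB T rest prev) := by
  intro rest
  induction rest with
  | nil =>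
    intro i₀ prev hr hle hp
    have : i₀ = S.length := by
      have := congrArg List.length hr
      simp [List.length_drop] at this
      omega
    subst this
    simpa [lastRowB] using hp
  | cons sw rest ih =>
    intro i₀ prev hr hle hp
    have hlt : i₀ < S.length := by
      by_contra hge
      rw [List.drop_eq_nil_of_le (by omega)] at hr
      exact (List.cons_ne_nil _ _) hr
    have hdrop := pvDrop_cons S i₀ hlt
    rw [hdrop] at hr
    have hsw : sw = S.getD i₀ "" := by injection hr
    have hrest : rest = S.drop (i₀+1) := by injection hr
    simp only [lastRowB]
    subst hsw
    exact ih (i₀+1) _ hrest (by omega) (mkRowB_ok S T i₀ prev hp)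

lemma row0_ok (S T : List String) : RowOKB S T 0 ((0, []) :: row0B T 0 []) := by
  intro j hj
  rcases j with _ | t
  · simp [List.getD, dpF, alF]
  · simp only [List.getD_cons_succ]
    have := row0B_getD S T t 0 0 [] (by simp [dpF]) (by simp [alF]) (by omega)
    rw [show T.drop 0 = T from rfl] at this
    rw [this]
    congr 2 <;> omega

-- ---- main equality ----
lemma align_texts_eq (source target : String) :
    align_texts source target = align_texts_alt source target := by
  unfold align_texts align_texts_alt
  simp only []
  set S := PySem.Str.split₀ source with hS
  set T := PySem.Str.split₀ target with hT
  have hA := btA_eq S T (S.length + T.length) S.length T.length [] le_rfl le_rfl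
  have hrev := trace_rev S T (S.length + T.length) S.length T.length le_rfl
  have hB := lastRowB_ok S T S 0 ((0, []) :: row0B T 0 []) rfl (by omega) (row0_ok S T)
  have hfin := hB T.length le_rfl
  rw [hA, hfin]
  simp [hrev]

-- ===== VERDICT (by name: the statement is the Claim_ definition above) =====
theorem align_texts_spec : Claim_equal_align_texts := by
  intro source target _
  unfold Spec_align_texts
  exact align_texts_eq source target
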